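-- pv_equiv track=rewrite | github.com/lsj1137/problem-solving | 프로그래머스/1/72410. 신규 아이디 추천/신규 아이디 추천.py | solution
-- ===== SOURCE A (Python) =====
-- def solution(new_id):
--     sp = "~!@#$%^&*()=+[{]}:?,<>/"
--     answer = ''
--     nid = ''.join(c for c in new_id.lower() if c not in sp).strip('.')
--     for i in range(len(nid)):
--         if nid[i]=='.' and nid[i+1]=='.':
--             continue
--         answer+=nid[i]
--     if not answer:
--         answer += 'a'
--     if len(answer)>15:
--         answer = answer[:15].rstrip('.')
--     while len(answer)<3:
--         answer += answer[-1]
--     return answer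
-- ===== SOURCE B (Python) =====
-- def solution(new_id):
--     sp = "~!@#$%^&*()=+[{]}:?,<>/"
--     s = ''.join(c for c in new_id.lower() if c not in sp)
--     s = '.'.join(p for p in s.split('.') if p)
--     if not s:
--         s = 'a'
--     if len(s) > 15:
--         s = s[:15].rstrip('.')
--     return s + s[-1] * (3 - len(s))
-- ===== Notes on version B (the rewrite author's own statement) =====
-- stated objective: idiomatic
-- what changed: The index-based lookahead loop that collapses dot runs (and the strip of boundary dots before it) is replaced by the idiomatic split-on-dot / drop-empty-pieces / join-with-dot pipeline, and the trailing while-loop padding is replaced by arithmetic repetition of the last character.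
import Mathlib
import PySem

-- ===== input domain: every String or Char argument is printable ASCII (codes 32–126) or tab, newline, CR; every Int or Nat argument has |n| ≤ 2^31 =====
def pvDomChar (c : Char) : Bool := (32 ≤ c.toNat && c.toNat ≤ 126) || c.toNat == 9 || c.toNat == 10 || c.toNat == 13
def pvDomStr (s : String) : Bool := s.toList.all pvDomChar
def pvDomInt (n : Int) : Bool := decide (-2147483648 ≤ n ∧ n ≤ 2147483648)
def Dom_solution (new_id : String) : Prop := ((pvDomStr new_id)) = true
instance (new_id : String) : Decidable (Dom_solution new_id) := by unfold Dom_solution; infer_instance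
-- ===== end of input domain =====

-- B replaces A's index-lookahead dot-collapsing loop and its while-padding with a split('.')/join
-- pipeline and arithmetic padding (objective: idiomatic; a timing run measured B faster by a constant factor).

-- hand port of Python's s.rstrip('.'), used by both programs (no PySem primitive takes a char set
-- for rstrip); exact: drop '.'-chars from the reversed list, then reverse back.
def rstripDot (l : List Char) : List Char := (l.reverse.dropWhile (· == '.')).reverse

-- ===== PORT A =====
-- loop body of A's "for i in range(len(nid))" (the 'and' short-circuit is exact: when nid[i] is not
-- '.', Python never evaluates nid[i+1]; pyGet? returns none when i+1 is out of range, making the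
-- test false, exactly as the short-circuit makes it false there).
def bodyA (nid : List Char) (acc : List Char) (i : Int) : List Char :=
  if PySem.List.pyGetD nid i ' ' = '.' ∧ PySem.List.pyGet? nid (i + 1) = some '.' then acc
  else acc ++ [PySem.List.pyGetD nid i ' ']

-- port of A's trailing "while len(answer)<3: answer += answer[-1]" (length grows, so it terminates)
def padLoop (ans : List Char) : List Char :=
  if ans.length < 3 then padLoop (ans ++ [PySem.List.pyGetD ans (-1) ' ']) else ans
termination_by 3 - ans.length
decreasing_by simp [List.length_append]; omega

def solution (new_id : String) : String :=
  let sp := "~!@#$%^&*()=+[{]}:?,<>/".toList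
  let nid := PySem.Chars.stripChars ((PySem.Chars.lower new_id.toList).filter (fun c => !sp.contains c)) ['.']
  let answer : List Char := []
  let answer := (PySem.List.pyRange 0 (PySem.List.len nid) 1).foldl (bodyA nid) answer
  let answer := if answer = [] then answer ++ ['a'] else answer
  let answer := if PySem.List.len answer > 15 then rstripDot (PySem.List.slice answer none (some 15)) else answer
  String.mk (padLoop answer)

-- ===== PORT B =====
def solution_alt (new_id : String) : String :=
  let sp := "~!@#$%^&*()=+[{]}:?,<>/".toList
  let s := (PySem.Chars.lower new_id.toList).filter (fun c => !sp.contains c)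
  let s := PySem.Chars.join ['.'] ((PySem.Chars.splitOn s ['.']).filter (fun p => p ≠ []))
  let s := if s = [] then ['a'] else s
  let s := if PySem.List.len s > 15 then rstripDot (PySem.List.slice s none (some 15)) else s
  String.mk (s ++ List.replicate (3 - s.length) (PySem.List.pyGetD s (-1) ' '))

-- ===== PRECONDITION & SPEC =====
def Spec_solution (new_id : String) (out : String) : Prop := out = solution_alt new_id
instance (new_id : String) (out : String) : Decidable (Spec_solution new_id out) := by unfold Spec_solution; infer_instance

-- ===== CLAIM (what is proved, stated in full; the proofs are below) =====
def Claim_equal_solution : Prop := ∀ (new_id : String), Dom_solution new_id → Spec_solution new_id (solution new_id)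

-- ===== LEMMAS AND PROOFS =====
def rs : List Char → List Char
  | [] => []
  | c :: r => match rs r with
    | [] => if c = '.' then [] else [c]
    | x => c :: x
lemma rstripDot_eq_rs (l : List Char) : rstripDot l = rs l := by
  induction l with
  | nil => rfl
  | cons c r ih =>
    simp only [rstripDot, List.reverse_cons, List.dropWhile_append] at *
    rw [rs]
    by_cases h : (r.reverse.dropWhile (· == '.')).isEmpty
    · rw [List.isEmpty_iff] at h
      rw [h] at ih
      simp only [h, List.isEmpty_nil, if_true]
      have hr : rs r = [] := by simpa using ih.symm
      rw [hr]
      by_cases hc : c = '.' <;>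
        simp [List.dropWhile, show (c == '.') = decide (c = '.') from rfl, hc]
    · have h' : ¬ (r.reverse.dropWhile (· == '.')).isEmpty = true := h
      rw [List.isEmpty_iff] at h'
      simp only [h, Bool.false_eq_true, if_false, List.reverse_append]
      have : rs r ≠ [] := by rw [← ih]; simpa [rstripDot] using h'
      cases hrs : rs r with
      | nil => exact absurd hrs this
      | cons a b =>
        rw [hrs, List.reverse_eq_iff] at ih
        simp [ih]
def splitDots : List Char → List (List Char)
  | [] => [[]]
  | c :: r => if c = '.' then [] :: splitDots r else (splitDots r).modifyHead (c :: ·)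

lemma splitDots_ne_nil (l : List Char) : splitDots l ≠ [] := by
  cases l with
  | nil => simp [splitDots]
  | cons c r =>
    rw [splitDots]
    split_ifs
    · simp
    · cases h : splitDots r with
      | nil => exact absurd h (by induction r <;> simp [splitDots] <;> split_ifs <;> simp_all)
      | cons a b => simp [h]

lemma splitOn_go_spec (fuel : Nat) (l cur : List Char) (acc : List (List Char)) (h : l.length < fuel) :
    PySem.Chars.splitOn.go ['.'] fuel l cur acc
      = acc.reverse ++ (splitDots l).modifyHead (cur.reverse ++ ·) := by
  induction fuel generalizing l cur acc with
  | zero => omega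
  | succ f ih =>
    cases l with
    | nil =>
      rw [PySem.Chars.splitOn.go]
      simp [splitDots]
      omega
    | cons c r =>
      rw [PySem.Chars.splitOn.go]
      by_cases hc : c = '.'
      · subst hc
        have hp : List.isPrefixOf ['.'] ('.' :: r) = true := by simp [List.isPrefixOf]
        simp only [hp, if_true, List.length_cons, List.drop_succ_cons, List.length_nil, List.drop_zero]
        rw [ih r [] ((cur.reverse) :: acc) (by simpa using Nat.lt_of_succ_lt_succ h)]
        simp [splitDots]
        cases splitDots r <;> rfl
      · have hp : List.isPrefixOf ['.'] (c :: r) = false := by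
          simp [List.isPrefixOf]; exact fun hh => absurd hh.symm hc
        simp only [hp, Bool.false_eq_true, if_false]
        rw [ih r (c :: cur) acc (by simpa using Nat.lt_of_succ_lt_succ h)]
        rw [splitDots]
        simp only [hc, if_false]
        cases hs : splitDots r with
        | nil => exact absurd hs (splitDots_ne_nil r)
        | cons a b => simp [List.modifyHead]

lemma splitOn_eq_splitDots (l : List Char) : PySem.Chars.splitOn l ['.'] = splitDots l := by
  rw [PySem.Chars.splitOn, splitOn_go_spec _ _ _ _ (by omega)]
  cases hs : splitDots l with
  | nil => exact absurd hs (splitDots_ne_nil l)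
  | cons a b => simp [List.modifyHead]
def colA : List Char → List Char
  | [] => []
  | c :: rest => (if c = '.' ∧ rest.head? = some '.' then [] else [c]) ++ colA rest

def core : List Char → List Char
  | [] => []
  | c :: r =>
    if c = '.' then
      (match r with
       | [] => []
       | d :: _ => if d = '.' then core r else '.' :: core r)
    else c :: core r

lemma rs_cons_ne (c : Char) (r : List Char) (hc : c ≠ '.') : rs (c :: r) = c :: rs r := by
  rw [rs]; cases rs r <;> simp [hc]

lemma colA_cons_ne (c : Char) (x : List Char) (hc : c ≠ '.') : colA (c :: x) = c :: colA x := by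
  rw [colA]; simp [hc]

lemma colA_rs (r : List Char) : colA (rs r) = core r := by
  induction r with
  | nil => rfl
  | cons c r' ih =>
    by_cases hc : c = '.'
    · subst hc
      rw [core.eq_def]
      simp only [if_true]
      cases r' with
      | nil => rfl
      | cons d r'' =>
        by_cases hd : d = '.'
        · subst hd
          simp only [if_true]
          rw [← ih]
          -- both sides equal colA (rs ('.' :: r''))
          rw [rs]
          cases hrs : rs ('.' :: r'') with
          | nil => rfl
          | cons a y =>
            have ha : a = '.' := by
              rw [rs] at hrs
              cases h2 : rs r'' with
              | nil => rw [h2] at hrs; simp at hrs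
              | cons p q => rw [h2] at hrs; simp at hrs; exact hrs.1.symm
            subst ha
            rw [colA]
            simp
        · simp only [hd, if_false]
          rw [rs, rs_cons_ne d r'' hd, colA]
          have h3 : d :: colA (rs r'') = core (d :: r'') := by
            rw [← colA_cons_ne d _ hd, ← rs_cons_ne d r'' hd, ih]
          simp [hd, ← h3, colA_cons_ne d _ hd]
    · rw [rs_cons_ne c r' hc, colA_cons_ne c _ hc, ih]
      conv_rhs => rw [core.eq_def]
      simp [hc]
def join' (l : List (List Char)) : List Char := (l.map (fun p => '.' :: p)).flatten

lemma intercalate_dot_cons (a : List Char) (rest : List (List Char)) :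
    List.intercalate ['.'] (a :: rest) = a ++ join' rest := by
  induction rest generalizing a with
  | nil => simp [List.intercalate, join']
  | cons b t ih =>
    simp only [List.intercalate, List.intersperse] at *
    simp [List.intersperse, join'] at *
    simp [ih b, join']

lemma aux_splitDots (r : List Char) :
    (splitDots r).headI ++ join' (((splitDots r).tail).filter (fun p => p ≠ [])) = core r := by
  induction r with
  | nil => simp [splitDots, join', core]
  | cons c r' ih =>
    by_cases hc : c = '.'
    · subst hc
      rw [splitDots]
      simp only [if_true]
      rw [core.eq_def]
      cases r' with
      | nil => simp [splitDots, join']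
      | cons d r'' =>
        simp only [List.headI, List.tail]
        by_cases hd : d = '.'
        · subst hd
          simp only [if_true]
          rw [← ih]
          rw [splitDots]
          simp
        · simp only [hd, if_false]
          rw [splitDots] at ih ⊢
          simp only [hd, if_false] at ih ⊢
          cases hs : splitDots r'' with
          | nil => exact absurd hs (splitDots_ne_nil r'')
          | cons h2 t2 =>
            rw [hs] at ih
            simp only [List.modifyHead, List.headI, List.tail, List.filter] at ih ⊢
            rw [if_pos trivial]
            rw [← ih]
            simp [join']
    · rw [splitDots]
      simp only [hc, if_false]
      cases hs : splitDots r' with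
      | nil => exact absurd hs (splitDots_ne_nil r')
      | cons h2 t2 =>
        rw [hs] at ih
        simp only [List.headI, List.tail] at ih ⊢
        rw [core.eq_def]
        simp [hc, List.modifyHead, ← ih]

lemma join_filter_splitDots (s : List Char) :
    PySem.Chars.join ['.'] ((splitDots s).filter (fun p => p ≠ []))
      = core (s.dropWhile (· == '.')) := by
  induction s with
  | nil => simp [splitDots, PySem.Chars.join, List.intercalate, core]
  | cons c r ih =>
    by_cases hc : c = '.'
    · subst hc
      rw [splitDots]
      simpa using ih
    · rw [splitDots]
      simp only [hc, if_false]
      cases hs : splitDots r with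
      | nil => exact absurd hs (splitDots_ne_nil r)
      | cons h2 t2 =>
        rw [List.dropWhile_cons_of_neg (by simp [hc])]
        rw [core.eq_def]
        simp only [hc, if_false]
        have := aux_splitDots r
        rw [hs] at this
        simp only [List.headI, List.tail] at this
        simp only [List.modifyHead, List.filter, ne_eq, List.cons_ne_nil, not_false_iff, decide_true]
        rw [PySem.Chars.join, intercalate_dot_cons]
        rw [← this]
        simp only [List.cons_append]

lemma stripChars_dot (s : List Char) :
    PySem.Chars.stripChars s ['.'] = rs (s.dropWhile (· == '.')) := by
  rw [← rstripDot_eq_rs]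
  rw [PySem.Chars.stripChars, rstripDot]
  have h1 : (fun c => List.contains ['.'] c) = (fun c => c == '.') := by
    funext c
    simp only [List.contains, List.elem_cons, List.elem_nil, Bool.or_false]
    cases c == '.' <;> rfl
  rw [h1]

lemma loopA (suf : List Char) : ∀ (pre acc : List Char),
    (PySem.List.pyRange (pre.length : Int) ((pre.length + suf.length : Nat) : Int) 1).foldl
        (bodyA (pre ++ suf)) acc = acc ++ colA suf := by
  induction suf with
  | nil =>
    intro pre acc
    simp [PySem.List.pyRange, colA]
  | cons c rest ih =>
    intro pre acc
    have hlt : (pre.length : Int) < ((pre.length + (c :: rest).length : Nat) : Int) := by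
      push_cast [List.length_cons]; omega
    rw [PySem.List.pyRange_one_cons hlt, List.foldl_cons]
    have hget : PySem.List.pyGetD (pre ++ c :: rest) (pre.length : Int) ' ' = c := by
      rw [PySem.List.pyGetD, PySem.List.pyGet?_append_length]
      rfl
    have hget1 : PySem.List.pyGet? (pre ++ c :: rest) ((pre.length : Int) + 1) = rest.head? := by
      have := PySem.List.pyGet?_append_right pre (c :: rest) 1
      simpa [List.head?_eq_getElem?] using this
    have hrange : PySem.List.pyRange ((pre.length : Int) + 1) ((pre.length + (c :: rest).length : Nat) : Int) 1
        = PySem.List.pyRange (((pre ++ [c]).length : Nat) : Int) (((pre ++ [c]).length + rest.length : Nat) : Int) 1 := by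
      congr 1 <;> simp <;> omega
    have hnid : pre ++ c :: rest = (pre ++ [c]) ++ rest := by simp
    rw [bodyA, hget, hget1]
    by_cases hcond : c = '.' ∧ rest.head? = some '.'
    · rw [if_pos hcond, hrange, hnid, ih (pre ++ [c]) acc]
      rw [colA]
      rw [if_pos hcond]
      simp
    · rw [if_neg hcond, hrange, hnid, ih (pre ++ [c]) (acc ++ [c])]
      rw [colA]
      rw [if_neg hcond]
      simp

lemma pyGetD_last1 (a : Char) : PySem.List.pyGetD [a] (-1) ' ' = a := by
  simpa using PySem.List.pyGetD_neg_one_append_singleton (xs := []) (x := a) (d := ' ')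

lemma pyGetD_last2 (a b : Char) : PySem.List.pyGetD [a, b] (-1) ' ' = b := by
  simpa using PySem.List.pyGetD_neg_one_append_singleton (xs := [a]) (x := b) (d := ' ')

lemma padLoop_eq (s : List Char) (hs : s ≠ []) :
    padLoop s = s ++ List.replicate (3 - s.length) (PySem.List.pyGetD s (-1) ' ') := by
  match s with
  | [a] =>
    rw [padLoop]; simp [pyGetD_last1]
    rw [padLoop]; simp [pyGetD_last2]
    rw [padLoop]; simp [pyGetD_last1, List.replicate]
  | [a, b] =>
    rw [padLoop]; simp [pyGetD_last2]
    rw [padLoop]; simp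
  | a :: b :: c :: t =>
    rw [padLoop]
    have : ¬ (a :: b :: c :: t).length < 3 := by simp
    simp [this]


lemma core_shape (l : List Char) :
    core (l.dropWhile (· == '.')) = [] ∨
      ∃ c r, core (l.dropWhile (· == '.')) = c :: r ∧ c ≠ '.' := by
  cases hd : l.dropWhile (· == '.') with
  | nil => left; simp [core]
  | cons c r =>
    right
    have hne : l.dropWhile (· == '.') ≠ [] := by simp [hd]
    have hc0 := List.head_dropWhile_not (· == '.') hne
    simp only [hd, List.head_cons] at hc0
    have hc' : c ≠ '.' := by simpa using hc0
    exact ⟨c, core r, by rw [core.eq_def]; simp [hc'], hc'⟩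

lemma solution_eq_alt (new_id : String) : solution new_id = solution_alt new_id := by
  unfold solution solution_alt
  simp only [PySem.List.len_eq]
  set t := (PySem.Chars.lower new_id.toList).filter
      (fun c => !("~!@#$%^&*()=+[{]}:?,<>/".toList).contains c) with ht
  -- A's collapsing loop computes the common normal form
  have hA : (PySem.List.pyRange 0 ((PySem.Chars.stripChars t ['.']).length : Int) 1).foldl
      (bodyA (PySem.Chars.stripChars t ['.'])) [] = core (t.dropWhile (· == '.')) := by
    have := loopA (PySem.Chars.stripChars t ['.']) [] []
    simp only [List.nil_append, List.length_nil, Nat.cast_zero, Nat.zero_add, zero_add] at this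
    rw [this, stripChars_dot, colA_rs]
  -- B's split/join computes the same normal form
  have hB : PySem.Chars.join ['.'] ((PySem.Chars.splitOn t ['.']).filter (fun p => p ≠ []))
      = core (t.dropWhile (· == '.')) := by
    rw [splitOn_eq_splitDots, join_filter_splitDots]
  rw [hA, hB]
  rcases core_shape t with hk | ⟨c, r, hk, hc⟩
  · rw [hk]
    simp only [if_pos rfl, List.nil_append]
    norm_num [padLoop_eq]
  · rw [hk]
    simp only [if_neg (List.cons_ne_nil c r)]
    by_cases hlen : ((c :: r).length : Int) > 15
    · rw [if_pos hlen, PySem.List.slice_to _ (by norm_num)]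
      have h14 : (15 : Int).toNat = 14 + 1 := rfl
      rw [h14, List.take_succ_cons, rstripDot_eq_rs, rs_cons_ne c _ hc]
      rw [padLoop_eq _ (List.cons_ne_nil _ _)]
    · rw [if_neg hlen, padLoop_eq _ (List.cons_ne_nil _ _)]

-- ===== VERDICT (by name: the statement is the Claim_ definition above) =====
theorem solution_spec : Claim_equal_solution := by
  intro new_id _
  exact solution_eq_alt new_id
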